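-- pv_equiv track=rewrite | github.com/unitysvc-labs/.github | scripts/sync_dashboard.py | _breakdown_for_services
-- ===== SOURCE A (Python) =====
-- from typing import Any
--
-- def _breakdown_for_services(
--     services: list[dict[str, Any]],
-- ) -> tuple[dict[str, int], dict[str, int], dict[str, int], list[str]]:
--     """Compute lifecycle / visibility / listing-type / service-type
--     cells for a list of services (the rendering helpers consume the
--     output as-is).
--     """
--     lifecycle: dict[str, int] = {}
--     visibility: dict[str, int] = {}
--     listing_type: dict[str, int] = {}
--     types: set[str] = set()
--     for svc in services:
--         status = svc.get("status")
--         if status: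
--             # A service with ``revision_of`` set is a revision of another
--             # service, not an independent one — bucket it separately so
--             # e.g. 3 rejected revisions of an active service don't read
--             # as 3 unrelated rejected services.
--             key = f"{status} revision" if svc.get("revision_of") else status
--             lifecycle[key] = lifecycle.get(key, 0) + 1
--         vis = svc.get("visibility")
--         # Revisions are staged edits to a live service, not independently
--         # routable rows — exclude them from the visibility column entirely
--         # so e.g. a provider with 3 published + 3 revisions reads as
--         # "3 published" instead of "3 published · 3 unlisted".
--         if vis and not svc.get("revision_of"):
--             visibility[vis] = visibility.get(vis, 0) + 1
--         # Listing type follows the same revision rule as visibility: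
--         # revisions piggy-back on their parent's listing, so counting
--         # them separately would double-count the same listed offering.
--         lt = svc.get("listing_type")
--         if lt and not svc.get("revision_of"):
--             listing_type[lt] = listing_type.get(lt, 0) + 1
--         st = svc.get("service_type")
--         if st:
--             types.add(st)
--
--     return lifecycle, visibility, listing_type, sorted(types)
-- ===== SOURCE B (Python) =====
-- from typing import Any
--
--
-- def _count(keys) -> dict[str, int]:
--     out: dict[str, int] = {}
--     for k in keys:
--         out[k] = out.get(k, 0) + 1
--     return out
--
--
-- def _breakdown_for_services(
--     services: list[dict[str, Any]],
-- ) -> tuple[dict[str, int], dict[str, int], dict[str, int], list[str]]: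
--     """Same cells as the fused loop, computed as four independent passes."""
--     lifecycle = _count(
--         f"{svc.get('status')} revision" if svc.get("revision_of") else svc.get("status")
--         for svc in services
--         if svc.get("status")
--     )
--     visibility = _count(
--         svc.get("visibility")
--         for svc in services
--         if svc.get("visibility") and not svc.get("revision_of")
--     )
--     listing_type = _count(
--         svc.get("listing_type")
--         for svc in services
--         if svc.get("listing_type") and not svc.get("revision_of")
--     )
--     types = sorted({svc.get("service_type") for svc in services if svc.get("service_type")})
--     return lifecycle, visibility, listing_type, types
-- ===== Notes on version B (the rewrite author's own statement) =====
-- stated objective: alternative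
-- what changed: Replaced A's single fused loop threading four accumulators with four independent self-contained passes: a shared dict-counting helper applied to three per-field filtered key lists, and sorted(set(...)) for the types column.
import Mathlib
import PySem

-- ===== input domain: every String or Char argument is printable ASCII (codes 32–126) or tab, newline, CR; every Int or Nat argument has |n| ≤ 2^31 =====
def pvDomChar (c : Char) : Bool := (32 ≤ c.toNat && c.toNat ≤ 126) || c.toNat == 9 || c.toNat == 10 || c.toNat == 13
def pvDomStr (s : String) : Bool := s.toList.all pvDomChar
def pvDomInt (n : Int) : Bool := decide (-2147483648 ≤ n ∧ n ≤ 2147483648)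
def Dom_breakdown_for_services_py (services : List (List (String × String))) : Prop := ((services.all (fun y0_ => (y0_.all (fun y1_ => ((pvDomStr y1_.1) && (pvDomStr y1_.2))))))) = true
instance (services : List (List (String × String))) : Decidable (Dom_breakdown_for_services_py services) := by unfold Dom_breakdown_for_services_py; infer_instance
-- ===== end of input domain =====

-- B replaces A's single fused loop with four independent passes (a shared counting
-- helper over per-field key lists, and a set comprehension for types): objective 'alternative'.


-- shared helper: Python truthiness of `svc.get(k)` (None or "" are falsy)
def pvTruthy (o : Option String) : Bool := !(o.getD "" == "")

-- ===== PORT A =====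
-- one fused loop over services, threading all four accumulators
def pvStepA (st : PySem.Dict String Int × PySem.Dict String Int × PySem.Dict String Int × PySem.Set String)
    (svc : List (String × String)) :
    PySem.Dict String Int × PySem.Dict String Int × PySem.Dict String Int × PySem.Set String :=
  let (lifecycle, visibility, listing_type, types) := st
  let status := PySem.Dict.get? ⟨svc⟩ "status"
  let lifecycle :=
    if pvTruthy status then
      let key := if pvTruthy (PySem.Dict.get? ⟨svc⟩ "revision_of")
                 then (status.getD "") ++ " revision" else status.getD ""
      lifecycle.insert key (lifecycle.getD key 0 + 1)
    else lifecycle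
  let vis := PySem.Dict.get? ⟨svc⟩ "visibility"
  let visibility :=
    if pvTruthy vis && !(pvTruthy (PySem.Dict.get? ⟨svc⟩ "revision_of")) then
      visibility.insert (vis.getD "") (visibility.getD (vis.getD "") 0 + 1)
    else visibility
  let lt := PySem.Dict.get? ⟨svc⟩ "listing_type"
  let listing_type :=
    if pvTruthy lt && !(pvTruthy (PySem.Dict.get? ⟨svc⟩ "revision_of")) then
      listing_type.insert (lt.getD "") (listing_type.getD (lt.getD "") 0 + 1)
    else listing_type
  let st' := PySem.Dict.get? ⟨svc⟩ "service_type"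
  let types := if pvTruthy st' then PySem.Set.add types (st'.getD "") else types
  (lifecycle, visibility, listing_type, types)

def breakdown_for_services_py (services : List (List (String × String))) : (List (String × Int)) × (List (String × Int)) × (List (String × Int)) × List String :=
  let r := services.foldl pvStepA (PySem.Dict.empty, PySem.Dict.empty, PySem.Dict.empty, PySem.Set.empty)
  (r.1.items, r.2.1.items, r.2.2.1.items, PySem.List.sorted r.2.2.2 (fun x => x) false)

-- ===== PORT B =====
-- four independent passes: a counting helper applied to three per-field key lists,
-- plus sorted(set(...)) for the types column
def pvCount (keys : List String) : PySem.Dict String Int :=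
  keys.foldl (fun out k => out.insert k (out.getD k 0 + 1)) PySem.Dict.empty

def pvIsRev (svc : List (String × String)) : Bool := pvTruthy (PySem.Dict.get? ⟨svc⟩ "revision_of")

def pvLifeKey (svc : List (String × String)) : String :=
  let s := (PySem.Dict.get? ⟨svc⟩ "status").getD ""
  if pvIsRev svc then s ++ " revision" else s

def breakdown_for_services_py_alt (services : List (List (String × String))) : (List (String × Int)) × (List (String × Int)) × (List (String × Int)) × List String :=
  let lifecycle := pvCount ((services.filter (fun svc => pvTruthy (PySem.Dict.get? ⟨svc⟩ "status"))).map pvLifeKey)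
  let visibility := pvCount ((services.filter (fun svc => pvTruthy (PySem.Dict.get? ⟨svc⟩ "visibility") && !pvIsRev svc)).map
      (fun svc => (PySem.Dict.get? ⟨svc⟩ "visibility").getD ""))
  let listing_type := pvCount ((services.filter (fun svc => pvTruthy (PySem.Dict.get? ⟨svc⟩ "listing_type") && !pvIsRev svc)).map
      (fun svc => (PySem.Dict.get? ⟨svc⟩ "listing_type").getD ""))
  let types := PySem.List.sorted
      (PySem.Set.ofList ((services.filter (fun svc => pvTruthy (PySem.Dict.get? ⟨svc⟩ "service_type"))).map
        (fun svc => (PySem.Dict.get? ⟨svc⟩ "service_type").getD ""))) (fun x => x) false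
  (lifecycle.items, visibility.items, listing_type.items, types)

-- ===== PRECONDITION & SPEC =====
def Spec_breakdown_for_services_py (services : List (List (String × String))) (out : (List (String × Int)) × (List (String × Int)) × (List (String × Int)) × List String) : Prop := out = breakdown_for_services_py_alt services
instance (services : List (List (String × String))) (out : (List (String × Int)) × (List (String × Int)) × (List (String × Int)) × List String) : Decidable (Spec_breakdown_for_services_py services out) := by unfold Spec_breakdown_for_services_py; infer_instance

-- ===== CLAIM (what is proved, stated in full; the proofs are below) =====
def Claim_equal_breakdown_for_services_py : Prop := ∀ (services : List (List (String × String))), Dom_breakdown_for_services_py services → Spec_breakdown_for_services_py services (breakdown_for_services_py services)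

-- ===== LEMMAS AND PROOFS =====

-- one counting step of pvCount, for rewriting
def pvCStep (out : PySem.Dict String Int) (k : String) : PySem.Dict String Int :=
  out.insert k (out.getD k 0 + 1)

-- the fused fold splits into four independent folds over the filtered key lists
theorem pvSplit (services : List (List (String × String)))
    (l v t : PySem.Dict String Int) (ty : PySem.Set String) :
    services.foldl pvStepA (l, v, t, ty) =
      (((services.filter (fun svc => pvTruthy (PySem.Dict.get? ⟨svc⟩ "status"))).map pvLifeKey).foldl pvCStep l,
       ((services.filter (fun svc => pvTruthy (PySem.Dict.get? ⟨svc⟩ "visibility") && !pvIsRev svc)).map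
          (fun svc => (PySem.Dict.get? ⟨svc⟩ "visibility").getD "")).foldl pvCStep v,
       ((services.filter (fun svc => pvTruthy (PySem.Dict.get? ⟨svc⟩ "listing_type") && !pvIsRev svc)).map
          (fun svc => (PySem.Dict.get? ⟨svc⟩ "listing_type").getD "")).foldl pvCStep t,
       ((services.filter (fun svc => pvTruthy (PySem.Dict.get? ⟨svc⟩ "service_type"))).map
          (fun svc => (PySem.Dict.get? ⟨svc⟩ "service_type").getD "")).foldl PySem.Set.add ty) := by
  induction services generalizing l v t ty with
  | nil => rfl
  | cons svc rest ih =>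
    simp only [List.foldl_cons, List.filter_cons]
    rw [pvStepA]
    simp only [pvIsRev]
    split_ifs with h1 h2 h3 h4 h5 h6 h7 h8 h9 h10 h11 h12 h13 h14 h15 <;>
      simp_all [List.foldl_cons, pvCStep, pvLifeKey, pvIsRev]

-- ===== VERDICT (by name: the statement is the Claim_ definition above) =====
theorem breakdown_for_services_py_spec : Claim_equal_breakdown_for_services_py := by
  intro services _
  show _ = _
  rw [breakdown_for_services_py, breakdown_for_services_py_alt, pvSplit]
  rw [PySem.Set.ofList_eq_foldl]
  rfl
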